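-- pv_equiv track=rewrite | github.com/gabriribeiro5/QACatalog | utils/LHservice/scripts/validador-coligadas/acordo/modules/content/cpf_cnpj.py | validate_cpf_cnpj
-- ===== SOURCE A (Python) =====
-- def validate_cpf_cnpj(numbers):
--
--     if not numbers:
--         return False
--
--     # Obtém os números do CPF e ignora outros caracteres
--     value = [int(number) for number in numbers if number.isdigit()]
--
--
--     # Verifica se o CPF tem 11 digitos
--     if len(value) == 11:
--
--         cpf = value
--         # Valida igualdade de números
--         if cpf == cpf[::-1]:
--             return False
--
--         # Valida os campos verificadores do CPF
--         for element in range(9, 11):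
--             result = sum((cpf[number] * ((element+1) - number) for number in range(0, element)))
--             digit = ((result * 10) % 11) % 10
--             if digit != cpf[element]:
--                 return False
--
--         return True
--
--     elif len(value) == 14:
--
--         cnpj = value
--         # Valida igualdade de números
--         if cnpj == cnpj[::-1]:
--             return False
--
--         # Pegamos os primeiros 9 digitos do cnpj e geramos os digitos validadores
--         _cnpj = cnpj[:12]
--         prod = [5, 4, 3, 2, 9, 8, 7, 6, 5, 4, 3, 2]
--
--         while len(_cnpj) < 14:
--
--             result = sum([x*y for (x, y) in zip(_cnpj, prod)]) % 11
--
--             if result > 1: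
--                 dv = 11 - result
--             else:
--                 dv = 0
--
--             _cnpj.append(dv)
--             prod.insert(0, 6)
--
--         if _cnpj != cnpj:
--             return False
--
--         return True
-- ===== SOURCE B (Python) =====
-- def _dv(digits, weights):
--     r = sum(d * w for d, w in zip(digits, weights)) % 11
--     return 0 if r < 2 else 11 - r
--
--
-- def validate_cpf_cnpj(numbers):
--     if not numbers:
--         return False
--     value = [int(c) for c in numbers if c.isdigit()]
--     n = len(value)
--     if n not in (11, 14):
--         return None
--     if value == value[::-1]:
--         return False
--     w = [11, 10, 9, 8, 7, 6, 5, 4, 3, 2] if n == 11 else \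
--         [6, 5, 4, 3, 2, 9, 8, 7, 6, 5, 4, 3, 2]
--     k = n - 2
--     return (value[k] == _dv(value[:k], w[1:])
--             and value[k + 1] == _dv(value[:k + 1], w))
-- ===== Notes on version B (the rewrite author's own statement) =====
-- stated objective: simpler
-- what changed: Replaces A's two dissimilar per-branch loops (an index/range accumulation loop for CPF and a list-growing while loop plus whole-list comparison for CNPJ) with one shared check-digit helper (0 if weighted-sum%11 < 2 else 11-r) applied to explicit weight vectors, with a single length dispatch and direct comparison against the two check digits.
import Mathlib
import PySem

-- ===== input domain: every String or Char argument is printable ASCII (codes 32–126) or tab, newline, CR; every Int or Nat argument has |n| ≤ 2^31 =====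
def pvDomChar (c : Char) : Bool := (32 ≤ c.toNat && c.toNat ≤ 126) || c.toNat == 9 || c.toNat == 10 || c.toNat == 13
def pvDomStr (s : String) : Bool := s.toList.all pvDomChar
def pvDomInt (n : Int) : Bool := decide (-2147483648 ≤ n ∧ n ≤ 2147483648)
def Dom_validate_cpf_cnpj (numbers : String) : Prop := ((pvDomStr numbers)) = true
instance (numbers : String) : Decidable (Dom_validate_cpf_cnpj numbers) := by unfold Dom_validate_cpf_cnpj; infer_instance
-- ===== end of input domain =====

set_option maxRecDepth 4000


-- ===== PORT A =====
-- B is a unified-branch re-implementation: one shared check-digit helper and one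
-- dispatch; equivalence of return values is proved for all inputs (no mutation observable).

-- int(c) for a character with c.isdigit(): exact on ASCII digits '0'-'9'
def pyDigitVal (c : Char) : Int := (c.toNat : Int) - 48

-- A's inner CPF loop: 'for element in range(9, 11): ...' with early 'return False'.
-- cpf[number]/cpf[element] are always in range (length = 11, index ≤ 10), so getD is exact.
def cpfLoop (cpf : List Int) : List Nat → Option Bool
  | [] => some true
  | e :: rest =>
    let result : Int :=
      ((List.range e).map (fun n => cpf.getD n 0 * (((e : Nat) : Int) + 1 - (n : Int)))).sum
    let digit := ((result * 10) % 11) % 10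
    if digit ≠ cpf.getD e 0 then some false else cpfLoop cpf rest

-- A's 'while len(_cnpj) < 14' loop; '%' operands are nonnegative so Lean's % agrees with Python's.
def cnpjLoop (c : List Int) (prod : List Int) : List Int :=
  if _h : c.length < 14 then
    let result := (List.zipWith (· * ·) c prod).sum % 11
    let dv : Int := if result > 1 then 11 - result else 0
    cnpjLoop (c ++ [dv]) ((6 : Int) :: prod)
  else c
termination_by 14 - c.length
decreasing_by simp; omega

def validate_cpf_cnpj (numbers : String) : Option Bool :=
  if numbers = "" then some false
  else
    let value : List Int := (numbers.toList.filter (fun c => PySem.Chars.isdigit c)).map pyDigitVal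
    if value.length = 11 then
      let cpf := value
      if cpf = cpf.reverse then some false   -- cpf == cpf[::-1]
      else cpfLoop cpf [9, 10]
    else if value.length = 14 then
      let cnpj := value
      if cnpj = cnpj.reverse then some false
      else
        let res := cnpjLoop (cnpj.take 12) [5, 4, 3, 2, 9, 8, 7, 6, 5, 4, 3, 2]
        if res ≠ cnpj then some false else some true
    else none

-- ===== PORT B =====
-- _dv(digits, weights) from Source B
def dvB (digits weights : List Int) : Int :=
  let r := (List.zipWith (· * ·) digits weights).sum % 11
  if r < 2 then 0 else 11 - r

def validate_cpf_cnpj_alt (numbers : String) : Option Bool :=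
  if numbers = "" then some false
  else
    let value : List Int := (numbers.toList.filter (fun c => PySem.Chars.isdigit c)).map pyDigitVal
    let n := value.length
    if ¬ (n = 11 ∨ n = 14) then none        -- 'if n not in (11, 14): return None'
    else if value = value.reverse then some false
    else
      let w : List Int := if n = 11 then [11, 10, 9, 8, 7, 6, 5, 4, 3, 2]
                          else [6, 5, 4, 3, 2, 9, 8, 7, 6, 5, 4, 3, 2]
      let k := n - 2                         -- n ≥ 11 here, so Nat '-' matches Python
      some (decide (value.getD k 0 = dvB (value.take k) w.tail) &&
            decide (value.getD (k + 1) 0 = dvB (value.take (k + 1)) w))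

-- ===== PRECONDITION & SPEC =====
def Spec_validate_cpf_cnpj (numbers : String) (out : Option Bool) : Prop := out = validate_cpf_cnpj_alt numbers
instance (numbers : String) (out : Option Bool) : Decidable (Spec_validate_cpf_cnpj numbers out) := by unfold Spec_validate_cpf_cnpj; infer_instance

-- ===== CLAIM (what is proved, stated in full; the proofs are below) =====
def Claim_equal_validate_cpf_cnpj : Prop := ∀ (numbers : String), Dom_validate_cpf_cnpj numbers → Spec_validate_cpf_cnpj numbers (validate_cpf_cnpj numbers)

-- ===== LEMMAS AND PROOFS =====

-- ((S*10) % 11) % 10 equals B's 0 / 11 - r check-digit formula (10 ≡ -1 mod 11)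
lemma digit_key (S d : Int) :
    (S * 10 % 11 % 10 = d) ↔ (d = if S % 11 ≤ 1 then 0 else 11 - S % 11) := by
  have h10 : S * 10 % 11 = S % 11 * 10 % 11 := by
    rw [Int.mul_emod]; norm_num
  have hb1 : 0 ≤ S % 11 := Int.emod_nonneg _ (by norm_num)
  have hb2 : S % 11 < 11 := Int.emod_lt_of_pos _ (by norm_num)
  rw [h10]
  generalize S % 11 = r at *
  interval_cases r <;> omega

-- A's 'result > 1' branch order vs B's 'r < 2' order
lemma key2 (r : Int) : (if r > 1 then 11 - r else (0:Int)) = (if r ≤ 1 then 0 else 11 - r) := by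
  split_ifs <;> omega

-- the CNPJ comparison: A checks its rebuilt list against cnpj, B checks the two digits;
-- A's second check digit D2' is built from A's first (D1), B's (D2) from the actual digit a12
lemma branch2 (D1 D2 D2' a12 a13 : Int) (hcoh : D1 = a12 → D2' = D2) :
    (if (D1 = a12 → ¬ D2' = a13) then (some false : Option Bool) else some true)
      = some (decide (a12 = D1) && decide (a13 = D2)) := by
  by_cases h1 : D1 = a12
  · have h2 := hcoh h1
    subst h2
    by_cases h3 : D2' = a13
    · simp [h1, h3]
    · have h3' : ¬ a13 = D2' := fun e => h3 e.symm
      simp [h1, h3, h3']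
  · have h1' : ¬ a12 = D1 := fun e => h1 e.symm
    simp [h1, h1']

lemma cpf_case (v : List Int) (h : v.length = 11) :
    cpfLoop v [9, 10] =
      some (decide (v.getD 9 0 = dvB (v.take 9) ([(11:Int),10,9,8,7,6,5,4,3,2].tail)) &&
            decide (v.getD 10 0 = dvB (v.take 10) [11,10,9,8,7,6,5,4,3,2])) := by
  rcases v with _ | ⟨a0, v⟩
  · simp at h
  rcases v with _ | ⟨a1, v⟩
  · simp at h
  rcases v with _ | ⟨a2, v⟩
  · simp at h
  rcases v with _ | ⟨a3, v⟩
  · simp at h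
  rcases v with _ | ⟨a4, v⟩
  · simp at h
  rcases v with _ | ⟨a5, v⟩
  · simp at h
  rcases v with _ | ⟨a6, v⟩
  · simp at h
  rcases v with _ | ⟨a7, v⟩
  · simp at h
  rcases v with _ | ⟨a8, v⟩
  · simp at h
  rcases v with _ | ⟨a9, v⟩
  · simp at h
  rcases v with _ | ⟨a10, v⟩
  · simp at h
  rcases v with _ | ⟨z, v⟩
  · simp [cpfLoop, dvB, List.range_succ]
    simp only [digit_key]
    simp
    split_ifs <;> simp_all
  · simp at h

lemma cnpj_case (v : List Int) (h : v.length = 14) :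
    (if cnpjLoop (v.take 12) [5, 4, 3, 2, 9, 8, 7, 6, 5, 4, 3, 2] ≠ v then some false
     else some true) =
      some (decide (v.getD 12 0 = dvB (v.take 12) ([(6:Int),5,4,3,2,9,8,7,6,5,4,3,2].tail)) &&
            decide (v.getD 13 0 = dvB (v.take 13) [6,5,4,3,2,9,8,7,6,5,4,3,2])) := by
  rcases v with _ | ⟨a0, v⟩
  · simp at h
  rcases v with _ | ⟨a1, v⟩
  · simp at h
  rcases v with _ | ⟨a2, v⟩
  · simp at h
  rcases v with _ | ⟨a3, v⟩
  · simp at h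
  rcases v with _ | ⟨a4, v⟩
  · simp at h
  rcases v with _ | ⟨a5, v⟩
  · simp at h
  rcases v with _ | ⟨a6, v⟩
  · simp at h
  rcases v with _ | ⟨a7, v⟩
  · simp at h
  rcases v with _ | ⟨a8, v⟩
  · simp at h
  rcases v with _ | ⟨a9, v⟩
  · simp at h
  rcases v with _ | ⟨a10, v⟩
  · simp at h
  rcases v with _ | ⟨a11, v⟩
  · simp at h
  rcases v with _ | ⟨a12, v⟩
  · simp at h
  rcases v with _ | ⟨a13, v⟩
  · simp at h
  rcases v with _ | ⟨z, v⟩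
  · simp [cnpjLoop, dvB, key2, -ite_mul, -mul_ite]
    apply branch2
    intro hx
    rw [hx]
  · simp at h

-- ===== VERDICT (by name: the statement is the Claim_ definition above) =====
theorem validate_cpf_cnpj_spec : Claim_equal_validate_cpf_cnpj := by
  intro numbers _
  unfold Spec_validate_cpf_cnpj validate_cpf_cnpj validate_cpf_cnpj_alt
  by_cases h : numbers = ""
  · simp [h]
  · simp only [if_neg h]
    generalize ((numbers.toList.filter (fun c => PySem.Chars.isdigit c)).map pyDigitVal) = v
    by_cases h11 : v.length = 11
    · by_cases hp : v = v.reverse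
      · simp [h11, if_pos hp]
      · simp [h11, hp, cpf_case v h11]
    · by_cases h14 : v.length = 14
      · by_cases hp : v = v.reverse
        · simp [h14, if_pos hp]
        · simp [h14, hp, cnpj_case v h14]
      · simp [h11, h14]
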